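-- pv_equiv track=rewrite | github.com/LeandroSbr/todo-python-cli | to_do_class.py | filter_priority
-- ===== SOURCE A (Python) =====
-- from enum import Enum
--
-- class Priority(Enum):
--     HIGH = "High"
--     MEDIUM = "Medium"
--     LOW = "Low"
--
-- def filter_priority(data: dict) -> dict:
--     filtered = {k: v for k, v in data.items()
--                 if v["priority"] == Priority.HIGH.value}
--     filtered.update({k: v for k, v in data.items()
--                      if v["priority"] == Priority.MEDIUM.value})
--     filtered.update({k: v for k, v in data.items()
--                      if v["priority"] == Priority.LOW.value})
--     return filtered
-- ===== SOURCE B (Python) =====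
-- def filter_priority(data: dict) -> dict:
--     # Single categorizing pass into three buckets, then one merge High/Medium/Low
--     # (A makes three full scans over data plus two dict.update calls).
--     high, medium, low = [], [], []
--     for k, v in data.items():
--         p = v["priority"]
--         if p == "High":
--             high.append((k, v))
--         elif p == "Medium":
--             medium.append((k, v))
--         elif p == "Low":
--             low.append((k, v))
--     return dict(high + medium + low)
-- ===== Notes on version B (the rewrite author's own statement) =====
-- stated objective: faster
-- what changed: B replaces A's three separate full filtering scans (plus two dict.update passes) with one categorizing pass that appends each item into a High/Medium/Low bucket, then builds the result from the concatenated buckets.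
import Mathlib
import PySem

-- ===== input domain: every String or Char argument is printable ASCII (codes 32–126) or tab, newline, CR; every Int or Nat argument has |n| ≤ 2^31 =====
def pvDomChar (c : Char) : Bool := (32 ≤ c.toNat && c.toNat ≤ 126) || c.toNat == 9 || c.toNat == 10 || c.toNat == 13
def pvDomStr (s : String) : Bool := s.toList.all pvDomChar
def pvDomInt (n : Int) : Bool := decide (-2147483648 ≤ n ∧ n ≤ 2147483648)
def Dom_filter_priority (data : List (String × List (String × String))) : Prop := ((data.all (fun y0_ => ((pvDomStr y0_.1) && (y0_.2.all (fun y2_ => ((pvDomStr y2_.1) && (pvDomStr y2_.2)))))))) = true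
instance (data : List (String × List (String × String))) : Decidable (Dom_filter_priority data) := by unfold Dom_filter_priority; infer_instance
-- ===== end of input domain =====

-- B buckets the items by priority in ONE pass instead of A's three filtering scans;
-- the proved equivalence is on dict inputs (unique keys, every value carrying a "priority" key).

-- ===== PORT A =====
-- v["priority"] (Pre_ guarantees the key is present, so the getD default is never used)
def prioOf (v : List (String × String)) : String :=
  PySem.Dict.getD (PySem.Dict.mk v) "priority" ""

-- {k: v for k, v in data.items() if v["priority"] == P}  then two .update(...) of the same shape
def filter_priority (data : List (String × List (String × String))) : List (String × List (String × String)) :=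
  let filtered := (data.filter (fun kv => prioOf kv.2 == "High")).foldl
      (fun d kv => d.insert kv.1 kv.2) PySem.Dict.empty
  let filtered := (data.filter (fun kv => prioOf kv.2 == "Medium")).foldl
      (fun d kv => d.insert kv.1 kv.2) filtered
  let filtered := (data.filter (fun kv => prioOf kv.2 == "Low")).foldl
      (fun d kv => d.insert kv.1 kv.2) filtered
  filtered.items

-- ===== PORT B =====
-- one pass appending each item into its bucket, then High ++ Medium ++ Low
-- (Source B's final dict(high+medium+low) is the identity here: Pre_ gives unique keys)
def filter_priority_alt (data : List (String × List (String × String))) : List (String × List (String × String)) :=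
  let bs := data.foldl
    (fun (b : List (String × List (String × String)) × List (String × List (String × String)) × List (String × List (String × String))) kv =>
      let p := prioOf kv.2
      if p == "High" then (b.1 ++ [kv], b.2.1, b.2.2)
      else if p == "Medium" then (b.1, b.2.1 ++ [kv], b.2.2)
      else if p == "Low" then (b.1, b.2.1, b.2.2 ++ [kv])
      else b)
    ([], [], [])
  bs.1 ++ bs.2.1 ++ bs.2.2

-- ===== PRECONDITION & SPEC =====
-- Pre_ excludes assoc lists with duplicate keys (outer or inner), which cannot arise from a
-- Python dict argument, and entries whose value has no "priority" key, on which A raises KeyError.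
def Pre_filter_priority (data : List (String × List (String × String))) : Prop :=
  (data.map Prod.fst).Nodup ∧
    ∀ kv ∈ data, (kv.2.map Prod.fst).Nodup ∧ "priority" ∈ kv.2.map Prod.fst
instance (data : List (String × List (String × String))) : Decidable (Pre_filter_priority data) := by
  unfold Pre_filter_priority; infer_instance

def pvWitness_filter_priority : (List (String × List (String × String))) :=
  [("a", [("priority", "Low")]), ("b", [("priority", "High"), ("note", "x")]), ("c", [("priority", "?")])]

def Spec_filter_priority (data : List (String × List (String × String))) (out : List (String × List (String × String))) : Prop := out = filter_priority_alt data
instance (data : List (String × List (String × String))) (out : List (String × List (String × String))) : Decidable (Spec_filter_priority data out) := by unfold Spec_filter_priority; infer_instance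

-- ===== CLAIM (what is proved, stated in full; the proofs are below) =====
def Claim_equal_filter_priority : Prop := ∀ (data : List (String × List (String × String))), Dom_filter_priority data → Pre_filter_priority data → Spec_filter_priority data (filter_priority data)

-- ===== LEMMAS AND PROOFS =====

-- B's bucket loop collects exactly the three filters, appended behind the accumulators.
theorem alt_buckets (data : List (String × List (String × String)))
    (h m l : List (String × List (String × String))) :
    data.foldl
      (fun (b : List (String × List (String × String)) × List (String × List (String × String)) × List (String × List (String × String))) kv =>
        let p := prioOf kv.2
        if p == "High" then (b.1 ++ [kv], b.2.1, b.2.2)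
        else if p == "Medium" then (b.1, b.2.1 ++ [kv], b.2.2)
        else if p == "Low" then (b.1, b.2.1, b.2.2 ++ [kv])
        else b)
      (h, m, l)
    = (h ++ data.filter (fun kv => prioOf kv.2 == "High"),
       m ++ data.filter (fun kv => prioOf kv.2 == "Medium"),
       l ++ data.filter (fun kv => prioOf kv.2 == "Low")) := by
  induction data generalizing h m l with
  | nil => simp
  | cons kv rest ih =>
    simp only [List.foldl_cons, List.filter_cons]
    by_cases h1 : prioOf kv.2 == "High" <;>
      by_cases h2 : prioOf kv.2 == "Medium" <;>
        by_cases h3 : prioOf kv.2 == "Low" <;>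
          simp_all [List.append_assoc]

theorem ins_fold_items (d : PySem.Dict String (List (String × String)))
    (l : List (String × List (String × String)))
    (hn : (l.map Prod.fst).Nodup)
    (hc : ∀ a ∈ l, d.contains a.1 = false) :
    (l.foldl (fun d kv => d.insert kv.1 kv.2) d).items = d.items ++ l := by
  have := PySem.Dict.items_foldl_insert_fresh (l := l) (k := Prod.fst) (v := Prod.snd)
      (d := d) hc hn
  simpa using this

theorem A_items (data : List (String × List (String × String)))
    (hnd : (data.map Prod.fst).Nodup) :
    filter_priority data
      = data.filter (fun kv => prioOf kv.2 == "High")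
        ++ data.filter (fun kv => prioOf kv.2 == "Medium")
        ++ data.filter (fun kv => prioOf kv.2 == "Low") := by
  have hinj : ∀ a ∈ data, ∀ b ∈ data, a.1 = b.1 → a = b :=
    fun a ha b hb he => List.inj_on_of_nodup_map hnd ha hb he
  have ndf : ∀ p : (String × List (String × String)) → Bool,
      ((data.filter p).map Prod.fst).Nodup :=
    fun p => hnd.sublist (List.filter_sublist.map Prod.fst)
  have disj : ∀ (s t : String), s ≠ t →
      ∀ a ∈ data.filter (fun kv => prioOf kv.2 == s),
        a.1 ∉ (data.filter (fun kv => prioOf kv.2 == t)).map Prod.fst := by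
    intro s t hst a ha hmem
    rcases List.mem_map.1 hmem with ⟨b, hb, he⟩
    rcases List.mem_filter.1 ha with ⟨ha', hpa⟩
    rcases List.mem_filter.1 hb with ⟨hb', hpb⟩
    have hab : a = b := hinj a ha' b hb' he.symm
    subst hab
    simp only [beq_iff_eq] at hpa hpb
    exact hst (hpa ▸ hpb)
  have e1 : ((data.filter (fun kv => prioOf kv.2 == "High")).foldl
      (fun d kv => d.insert kv.1 kv.2) PySem.Dict.empty).items
      = data.filter (fun kv => prioOf kv.2 == "High") := by
    simpa using ins_fold_items PySem.Dict.empty _ (ndf _)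
      (fun a _ => PySem.Dict.contains_empty ..)
  have c1 : ∀ a ∈ data.filter (fun kv => prioOf kv.2 == "Medium"),
      ((data.filter (fun kv => prioOf kv.2 == "High")).foldl
        (fun d kv => d.insert kv.1 kv.2) PySem.Dict.empty).contains a.1 = false := by
    intro a ha
    rw [PySem.Dict.contains_eq_decide_mem_keys]
    have hk : ((data.filter (fun kv => prioOf kv.2 == "High")).foldl
        (fun d kv => d.insert kv.1 kv.2) PySem.Dict.empty).keys
        = (data.filter (fun kv => prioOf kv.2 == "High")).map Prod.fst := by
      show (List.map Prod.fst _) = _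
      rw [e1]
    rw [hk, decide_eq_false_iff_not]
    exact disj "Medium" "High" (by decide) a ha
  have e2 : ((data.filter (fun kv => prioOf kv.2 == "Medium")).foldl
      (fun d kv => d.insert kv.1 kv.2)
      ((data.filter (fun kv => prioOf kv.2 == "High")).foldl
        (fun d kv => d.insert kv.1 kv.2) PySem.Dict.empty)).items
      = data.filter (fun kv => prioOf kv.2 == "High")
        ++ data.filter (fun kv => prioOf kv.2 == "Medium") := by
    rw [ins_fold_items _ _ (ndf _) c1, e1]
  have c2 : ∀ a ∈ data.filter (fun kv => prioOf kv.2 == "Low"),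
      ((data.filter (fun kv => prioOf kv.2 == "Medium")).foldl
        (fun d kv => d.insert kv.1 kv.2)
        ((data.filter (fun kv => prioOf kv.2 == "High")).foldl
          (fun d kv => d.insert kv.1 kv.2) PySem.Dict.empty)).contains a.1 = false := by
    intro a ha
    rw [PySem.Dict.contains_eq_decide_mem_keys]
    have hk : ((data.filter (fun kv => prioOf kv.2 == "Medium")).foldl
        (fun d kv => d.insert kv.1 kv.2)
        ((data.filter (fun kv => prioOf kv.2 == "High")).foldl
          (fun d kv => d.insert kv.1 kv.2) PySem.Dict.empty)).keys
        = (data.filter (fun kv => prioOf kv.2 == "High")).map Prod.fst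
          ++ (data.filter (fun kv => prioOf kv.2 == "Medium")).map Prod.fst := by
      show (List.map Prod.fst _) = _
      rw [e2, List.map_append]
    rw [hk, decide_eq_false_iff_not, List.mem_append]
    push Not
    exact ⟨disj "Low" "High" (by decide) a ha, disj "Low" "Medium" (by decide) a ha⟩
  have e3 := ins_fold_items _ (data.filter (fun kv => prioOf kv.2 == "Low")) (ndf _) c2
  rw [e2] at e3
  show ((data.filter (fun kv => prioOf kv.2 == "Low")).foldl
      (fun d kv => d.insert kv.1 kv.2)
      ((data.filter (fun kv => prioOf kv.2 == "Medium")).foldl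
        (fun d kv => d.insert kv.1 kv.2)
        ((data.filter (fun kv => prioOf kv.2 == "High")).foldl
          (fun d kv => d.insert kv.1 kv.2) PySem.Dict.empty))).items = _
  rw [e3]

-- ===== VERDICT (by name: the statement is the Claim_ definition above) =====
theorem filter_priority_spec : Claim_equal_filter_priority := by
  intro data _ hpre
  show _ = _
  rw [A_items data hpre.1]
  unfold filter_priority_alt
  rw [alt_buckets]
  simp
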